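-- pv_equiv track=rewrite | github.com/lakshmi2812/dive_into_python | wonky_coins.py | wonky_coins
-- ===== SOURCE A (Python) =====
-- def wonky_coins(n):
--     if n == 0:
--         return 1
--     elif n == 1:
--         return 3
--     else:
--         count = wonky_coins(n//2)+wonky_coins(n//3)+wonky_coins(n//4)
--         return count
-- ===== SOURCE B (Python) =====
-- def wonky_coins(n):
--     memo = {}
--     def go(k):
--         hit = memo.get(k)
--         if hit is not None:
--             return hit
--         if k == 0:
--             v = 1
--         elif k == 1:
--             v = 3
--         else:
--             v = go(k // 2) + go(k // 3) + go(k // 4)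
--         memo[k] = v
--         return v
--     return go(n)
-- ===== Notes on version B (the rewrite author's own statement) =====
-- stated objective: faster
-- what changed: B memoizes the recursion in a dictionary so each distinct quotient state is computed once instead of A's exponentially repeated subcalls.
import Mathlib
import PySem

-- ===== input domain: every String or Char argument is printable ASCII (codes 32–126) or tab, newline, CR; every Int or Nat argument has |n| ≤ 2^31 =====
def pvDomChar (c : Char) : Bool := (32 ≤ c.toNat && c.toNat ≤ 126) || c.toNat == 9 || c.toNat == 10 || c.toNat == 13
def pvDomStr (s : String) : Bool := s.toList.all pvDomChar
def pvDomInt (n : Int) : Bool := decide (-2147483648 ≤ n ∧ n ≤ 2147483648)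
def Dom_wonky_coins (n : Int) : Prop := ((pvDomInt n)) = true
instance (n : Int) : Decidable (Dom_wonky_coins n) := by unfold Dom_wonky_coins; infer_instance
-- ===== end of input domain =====

-- B replaces A's exponential recursion by the same recursion memoized in a dictionary,
-- so each distinct floor-division value is computed once (measured asymptotically faster).


-- ===== PORT A =====
-- Literal port of A's naive recursion. For n < 0 the Python recurses forever
-- (RecursionError), excluded by Pre_; the '0' on that branch is never reached inside Pre_.
def wonky_coins (n : Int) : Int :=
  if n = 0 then 1
  else if n = 1 then 3
  else if n < 0 then 0
  else
    wonky_coins (PySem.Int.floordiv n 2) + wonky_coins (PySem.Int.floordiv n 3) +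
      wonky_coins (PySem.Int.floordiv n 4)
termination_by n.toNat
decreasing_by
  all_goals
    rename_i h0 h1 h2
    rw [PySem.Int.floordiv_eq_ediv_of_pos (by omega)]
    omega

-- ===== PORT B =====
-- Memoized recursion threading the dict; same unreachable guard for n < 0.
def wonky_go (k : Int) (memo : PySem.Dict Int Int) : Int × PySem.Dict Int Int :=
  match memo.get? k with
  | some v => (v, memo)
  | none =>
    if _h0 : k = 0 then (1, memo.insert k 1)
    else if _h1 : k = 1 then (3, memo.insert k 3)
    else if _hneg : k < 0 then (0, memo)
    else
      let r2 := wonky_go (PySem.Int.floordiv k 2) memo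
      let r3 := wonky_go (PySem.Int.floordiv k 3) r2.2
      let r4 := wonky_go (PySem.Int.floordiv k 4) r3.2
      let v := r2.1 + r3.1 + r4.1
      (v, r4.2.insert k v)
termination_by k.toNat
decreasing_by
  all_goals
    rw [PySem.Int.floordiv_eq_ediv_of_pos (by omega)]
    omega

def wonky_coins_alt (n : Int) : Int := (wonky_go n PySem.Dict.empty).1

-- ===== PRECONDITION & SPEC =====
-- A (and B) recurse without a base case on negative n and raise RecursionError there.
def Pre_wonky_coins (n : Int) : Prop := 0 ≤ n
instance (n : Int) : Decidable (Pre_wonky_coins n) := by unfold Pre_wonky_coins; infer_instance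
def pvWitness_wonky_coins : Int := (12)

def Spec_wonky_coins (n : Int) (out : Int) : Prop := out = wonky_coins_alt n
instance (n : Int) (out : Int) : Decidable (Spec_wonky_coins n out) := by unfold Spec_wonky_coins; infer_instance

-- ===== CLAIM (what is proved, stated in full; the proofs are below) =====
def Claim_equal_wonky_coins : Prop := ∀ (n : Int), Dom_wonky_coins n → Pre_wonky_coins n → Spec_wonky_coins n (wonky_coins n)

-- ===== LEMMAS AND PROOFS =====

-- Memo invariant: every entry stores A's value at its key.
def WonkyGood (memo : PySem.Dict Int Int) : Prop :=
  ∀ k v, memo.get? k = some v → v = wonky_coins k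

theorem wonky_coins_zero : wonky_coins 0 = 1 := by rw [wonky_coins]; norm_num

theorem wonky_coins_one : wonky_coins 1 = 3 := by rw [wonky_coins]; norm_num

theorem wonky_good_insert (memo : PySem.Dict Int Int) (hG : WonkyGood memo) (k v : Int)
    (hv : v = wonky_coins k) : WonkyGood (memo.insert k v) := by
  intro k' v' h'
  rw [PySem.Dict.get?_insert] at h'
  split at h'
  · rename_i he; subst he; cases h'; exact hv
  · exact hG k' v' h'

theorem wonky_go_correct : ∀ (N : Nat) (k : Int) (memo : PySem.Dict Int Int),
    k.toNat ≤ N → 0 ≤ k → WonkyGood memo →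
    (wonky_go k memo).1 = wonky_coins k ∧ WonkyGood (wonky_go k memo).2 := by
  intro N
  induction N with
  | zero =>
    intro k memo hN hk hG
    have hk0 : k = 0 := by omega
    subst hk0
    rw [wonky_go]
    split
    · rename_i v hmem
      exact ⟨hG 0 v hmem, hG⟩
    · rw [dif_pos rfl]
      exact ⟨wonky_coins_zero.symm, wonky_good_insert memo hG 0 1 wonky_coins_zero.symm⟩
  | succ N ih =>
    intro k memo hN hk hG
    rw [wonky_go]
    split
    · rename_i v hmem
      exact ⟨hG k v hmem, hG⟩
    · by_cases h0 : k = 0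
      · subst h0
        rw [dif_pos rfl]
        exact ⟨wonky_coins_zero.symm, wonky_good_insert memo hG 0 1 wonky_coins_zero.symm⟩
      by_cases h1 : k = 1
      · subst h1
        rw [dif_neg h0, dif_pos rfl]
        exact ⟨wonky_coins_one.symm, wonky_good_insert memo hG 1 3 wonky_coins_one.symm⟩
      have hneg : ¬ k < 0 := by omega
      rw [dif_neg h0, dif_neg h1, dif_neg hneg]
      have hk2 : 2 ≤ k := by omega
      have e2 : PySem.Int.floordiv k 2 = k / 2 := PySem.Int.floordiv_eq_ediv_of_pos (by omega)
      have e3 : PySem.Int.floordiv k 3 = k / 3 := PySem.Int.floordiv_eq_ediv_of_pos (by omega)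
      have e4 : PySem.Int.floordiv k 4 = k / 4 := PySem.Int.floordiv_eq_ediv_of_pos (by omega)
      obtain ⟨v2, g2⟩ := ih (PySem.Int.floordiv k 2) memo (by rw [e2]; omega) (by rw [e2]; omega) hG
      obtain ⟨v3, g3⟩ := ih (PySem.Int.floordiv k 3) _ (by rw [e3]; omega) (by rw [e3]; omega) g2
      obtain ⟨v4, g4⟩ := ih (PySem.Int.floordiv k 4) _ (by rw [e4]; omega) (by rw [e4]; omega) g3
      have hval : (wonky_go (PySem.Int.floordiv k 2) memo).1 +
          (wonky_go (PySem.Int.floordiv k 3) (wonky_go (PySem.Int.floordiv k 2) memo).2).1 +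
          (wonky_go (PySem.Int.floordiv k 4)
            (wonky_go (PySem.Int.floordiv k 3) (wonky_go (PySem.Int.floordiv k 2) memo).2).2).1 =
          wonky_coins k := by
        rw [v2, v3, v4]
        conv_rhs => rw [wonky_coins]
        rw [if_neg h0, if_neg h1, if_neg hneg]
      exact ⟨hval, wonky_good_insert _ g4 k _ hval⟩

-- ===== VERDICT (by name: the statement is the Claim_ definition above) =====
theorem wonky_coins_spec : Claim_equal_wonky_coins := by
  intro n _ hpre
  unfold Spec_wonky_coins wonky_coins_alt
  have h := wonky_go_correct n.toNat n PySem.Dict.empty (le_refl _) hpre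
    (by intro k v h; simp [PySem.Dict.get?_empty] at h)
  exact h.1.symm
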